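-- pv_equiv track=rewrite | github.com/VikhrModels/effective_llm_alignment | src/utils/array_utils.py | filter_indices
-- ===== SOURCE A (Python) =====
-- def filter_indices(a, b):
--     """
--     Фильтрует массив b, оставляя только те элементы, которые следуют сразу после элементов массива a.
--     """
--     filtered_b = []
--     a_len = len(a)
--     b_len = len(b)
--
--     # Указатель для массива b
--     j = 0
--
--     for i in range(a_len):
--         # Ищем индекс элемента из a в b
--         while j < b_len and b[j] <= a[i]:
--             j += 1
--         # Если следующий элемент в b существует, добавляем его в отфильтрованный массив
--         if j < b_len:
--             filtered_b.append(b[j])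
--             j += 1  # Переходим к следующему элементу в b
--
--     return filtered_b
-- ===== SOURCE B (Python) =====
-- def filter_indices(a, b):
--     """
--     Фильтрует массив b, оставляя только те элементы, которые следуют сразу после элементов массива a.
--     """
--     def go(i, lo, hi):
--         # process b[lo:hi] against a[i:], return (picked elements, new a-pointer)
--         if hi - lo == 0 or i >= len(a):
--             return [], i
--         if hi - lo == 1:
--             x = b[lo]
--             if x > a[i]:
--                 return [x], i + 1
--             return [], i
--         mid = (lo + hi) // 2
--         left, i1 = go(i, lo, mid)
--         right, i2 = go(i1, mid, hi)
--         return left + right, i2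
--
--     return go(0, 0, len(b))[0]
-- ===== Notes on version B (the rewrite author's own statement) =====
-- stated objective: alternative
-- what changed: Replaced the sequential outer-loop-over-a with inner-while-over-b scan by a divide-and-conquer recursion that splits b in half, processes each half against the remaining suffix of a (threading the a-pointer through), and concatenates the halves' picks.
import Mathlib
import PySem

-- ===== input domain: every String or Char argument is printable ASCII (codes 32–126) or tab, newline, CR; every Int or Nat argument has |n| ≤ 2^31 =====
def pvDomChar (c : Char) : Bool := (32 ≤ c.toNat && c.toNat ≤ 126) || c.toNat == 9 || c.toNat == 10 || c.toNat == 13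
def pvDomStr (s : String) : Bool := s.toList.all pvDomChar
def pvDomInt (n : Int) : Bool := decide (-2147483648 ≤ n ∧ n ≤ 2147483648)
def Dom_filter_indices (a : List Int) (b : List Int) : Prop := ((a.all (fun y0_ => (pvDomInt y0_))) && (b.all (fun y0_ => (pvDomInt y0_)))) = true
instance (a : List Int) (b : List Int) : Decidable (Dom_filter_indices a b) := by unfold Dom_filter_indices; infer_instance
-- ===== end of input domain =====

-- B replaces A's sequential outer-loop-over-a / inner-while-over-b scan by a
-- divide-and-conquer recursion over b that threads the a-pointer through the
-- two halves (alternative decomposition; same result, similar cost).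

-- ===== PORT A =====
-- A's inner `while j < b_len and b[j] <= a[i]: j += 1`
def pvSkipA (b : List Int) (ai : Int) (j : Nat) : Nat :=
  if h : j < b.length then
    if b[j] ≤ ai then pvSkipA b ai (j + 1) else j
  else j
termination_by b.length - j

-- A's `for i in range(a_len)` over a[i], carrying pointer j and filtered_b
def pvLoopA (b : List Int) : List Int → Nat → List Int → List Int
  | [], _, acc => acc
  | ai :: rest, j, acc =>
    let j' := pvSkipA b ai j
    if h : j' < b.length then pvLoopA b rest (j' + 1) (acc ++ [b[j']])
    else pvLoopA b rest j' acc

def filter_indices (a : List Int) (b : List Int) : List Int :=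
  pvLoopA b a 0 []

-- ===== PORT B =====
-- B's `go(i, lo, hi)`: process b[lo:hi] against a[i:], return (picked, new a-pointer).
-- The fuel argument only makes the recursion structural (fuel ≥ hi - lo on every
-- call, so the fuel-0 clause is never reached); b[lo] and a[i] are in range by
-- construction (lo < hi ≤ len b, i < len a), so getD is exact.
def pvGo (a : List Int) (b : List Int) : Nat → Nat → Nat → Nat → List Int × Nat
  | 0, i, _, _ => ([], i)
  | fuel + 1, i, lo, hi =>
    if hi - lo = 0 ∨ a.length ≤ i then ([], i)
    else if hi - lo = 1 then
      if a.getD i 0 < b.getD lo 0 then ([b.getD lo 0], i + 1) else ([], i)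
    else
      let mid := (lo + hi) / 2
      let l := pvGo a b fuel i lo mid
      let r := pvGo a b fuel l.2 mid hi
      (l.1 ++ r.1, r.2)

def filter_indices_alt (a : List Int) (b : List Int) : List Int :=
  (pvGo a b b.length 0 0 b.length).1

-- ===== PRECONDITION & SPEC =====
def Spec_filter_indices (a : List Int) (b : List Int) (out : List Int) : Prop := out = filter_indices_alt a b
instance (a : List Int) (b : List Int) (out : List Int) : Decidable (Spec_filter_indices a b out) := by unfold Spec_filter_indices; infer_instance

-- ===== CLAIM (what is proved, stated in full; the proofs are below) =====
def Claim_equal_filter_indices : Prop := ∀ (a : List Int) (b : List Int), Dom_filter_indices a b → Spec_filter_indices a b (filter_indices a b)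

-- ===== LEMMAS AND PROOFS =====

-- canonical sequential recursion: (picked, number of a-elements consumed)
def pvG : List Int → List Int → List Int × Nat
  | _, [] => ([], 0)
  | [], _ :: _ => ([], 0)
  | x :: as', y :: bs =>
    if x < y then
      let p := pvG as' bs
      (y :: p.1, p.2 + 1)
    else pvG (x :: as') bs

theorem pvG_nil (as : List Int) : pvG as [] = ([], 0) := by
  cases as <;> simp [pvG]

theorem pvG_nil_left (bs : List Int) : pvG [] bs = ([], 0) := by
  cases bs <;> simp [pvG]

-- composing pvG over a concatenation of the b-segments, threading the a-pointer
theorem pvG_append (u v : List Int) : ∀ (as : List Int),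
    pvG as (u ++ v)
      = ((pvG as u).1 ++ (pvG (as.drop (pvG as u).2) v).1,
         (pvG as u).2 + (pvG (as.drop (pvG as u).2) v).2) := by
  induction u with
  | nil =>
    intro as
    simp [pvG_nil]
  | cons y u' ih =>
    intro as
    cases as with
    | nil => simp [pvG_nil_left]
    | cons x as' =>
      by_cases hxy : x < y
      · simp only [List.cons_append, pvG, if_pos hxy]
        rw [ih as']
        simp [List.drop_succ_cons, Nat.add_right_comm]
      · simp only [List.cons_append, pvG, if_neg hxy]
        exact ih (x :: as')

-- A's loop equals the canonical recursion on the rest of b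
theorem loopA_eq_pvG (a b : List Int) :
    ∀ (n i j : Nat) (acc : List Int),
      (a.length - i) + (b.length - j) ≤ n →
      pvLoopA b (a.drop i) j acc = acc ++ (pvG (a.drop i) (b.drop j)).1 := by
  intro n
  induction n with
  | zero =>
    intro i j acc hle
    have hi : a.length ≤ i := by omega
    have hj : b.length ≤ j := by omega
    rw [List.drop_eq_nil_of_le hi, List.drop_eq_nil_of_le hj]
    simp [pvLoopA, pvG_nil]
  | succ n ih =>
    intro i j acc hle
    by_cases hi : i < a.length
    · by_cases hj : j < b.length
      · rw [List.drop_eq_getElem_cons hi, List.drop_eq_getElem_cons hj]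
        by_cases hc : b[j] ≤ a[i]
        · -- A's while skips b[j]; pvG skips it too
          have hA : pvLoopA b (a[i] :: a.drop (i + 1)) j acc
              = pvLoopA b (a[i] :: a.drop (i + 1)) (j + 1) acc := by
            simp only [pvLoopA]
            rw [pvSkipA, dif_pos hj, if_pos hc]
          have hG : pvG (a[i] :: a.drop (i + 1)) (b[j] :: b.drop (j + 1))
              = pvG (a[i] :: a.drop (i + 1)) (b.drop (j + 1)) := by
            simp only [pvG]
            rw [if_neg (not_lt.mpr hc)]
          rw [hA, hG, ← List.drop_eq_getElem_cons hi]
          exact ih i (j + 1) acc (by omega)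
        · -- b[j] > a[i]: both take b[j]
          have hskip : pvSkipA b a[i] j = j := by
            rw [pvSkipA, dif_pos hj, if_neg hc]
          have hA : pvLoopA b (a[i] :: a.drop (i + 1)) j acc
              = pvLoopA b (a.drop (i + 1)) (j + 1) (acc ++ [b[j]]) := by
            simp only [pvLoopA, hskip]
            rw [dif_pos hj]
          have hG : pvG (a[i] :: a.drop (i + 1)) (b[j] :: b.drop (j + 1))
              = (b[j] :: (pvG (a.drop (i + 1)) (b.drop (j + 1))).1,
                 (pvG (a.drop (i + 1)) (b.drop (j + 1))).2 + 1) := by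
            simp only [pvG]
            rw [if_pos (not_le.mp hc)]
          rw [hA, hG]
          have := ih (i + 1) (j + 1) (acc ++ [b[j]]) (by omega)
          simpa using this
      · -- b exhausted: A's remaining iterations do nothing
        have hbj : b.length ≤ j := by omega
        rw [List.drop_eq_nil_of_le hbj, List.drop_eq_getElem_cons hi]
        have hskip : pvSkipA b a[i] j = j := by
          rw [pvSkipA, dif_neg hj]
        have hA : pvLoopA b (a[i] :: a.drop (i + 1)) j acc
            = pvLoopA b (a.drop (i + 1)) j acc := by
          simp only [pvLoopA, hskip]
          rw [dif_neg hj]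
        rw [hA]
        have := ih (i + 1) j acc (by omega)
        rw [List.drop_eq_nil_of_le hbj] at this
        rw [this, pvG_nil, pvG_nil]
    · rw [List.drop_eq_nil_of_le (by omega), pvG_nil_left]
      simp [pvLoopA]

-- the b[lo:hi] segment
theorem seg_split (b : List Int) (lo mid hi : Nat) (h1 : lo ≤ mid) (h2 : mid ≤ hi) :
    (b.drop lo).take (hi - lo) = (b.drop lo).take (mid - lo) ++ ((b.drop mid).take (hi - mid)) := by
  rw [show hi - lo = (mid - lo) + (hi - mid) by omega, List.take_add, List.drop_drop,
    show lo + (mid - lo) = mid by omega]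

theorem seg_one (b : List Int) (lo : Nat) (h : lo < b.length) :
    (b.drop lo).take 1 = [b[lo]] := by
  rw [List.drop_eq_getElem_cons h]
  rfl

-- B's divide-and-conquer computes the canonical recursion on the segment
theorem pvGo_eq_pvG (a b : List Int) : ∀ (fuel i lo hi : Nat),
    hi - lo ≤ fuel → lo ≤ hi → hi ≤ b.length →
    pvGo a b fuel i lo hi
      = ((pvG (a.drop i) ((b.drop lo).take (hi - lo))).1,
         i + (pvG (a.drop i) ((b.drop lo).take (hi - lo))).2) := by
  intro fuel
  induction fuel with
  | zero =>
    intro i lo hi hn hlh hhb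
    have h0 : hi - lo = 0 := by omega
    rw [h0]
    simp [pvGo, pvG_nil]
  | succ n ih =>
    intro i lo hi hn hlh hhb
    by_cases h0 : hi - lo = 0 ∨ a.length ≤ i
    · rw [pvGo, if_pos h0]
      rcases h0 with h0 | h0
      · rw [h0]; simp [pvG_nil]
      · rw [List.drop_eq_nil_of_le h0, pvG_nil_left]; simp
    · push Not at h0
      obtain ⟨hne, hia⟩ := h0
      by_cases h1 : hi - lo = 1
      · rw [pvGo, if_neg (by push Not; exact ⟨hne, hia⟩), if_pos h1, h1]
        have hlo : lo < b.length := by omega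
        rw [seg_one b lo hlo, List.drop_eq_getElem_cons hia]
        have hga : a.getD i 0 = a[i] := by
          simp [List.getD, List.getElem?_eq_getElem hia]
        have hgb : b.getD lo 0 = b[lo] := by
          simp [List.getD, List.getElem?_eq_getElem hlo]
        rw [hga, hgb]
        by_cases hc : a[i] < b[lo]
        · simp only [pvG, if_pos hc]
        · simp only [pvG, if_neg hc]; simp
      · rw [pvGo, if_neg (by push Not; exact ⟨hne, hia⟩), if_neg h1]
        simp only []
        set mid := (lo + hi) / 2 with hmid
        have hmid1 : lo ≤ mid := by omega
        have hmid2 : mid ≤ hi := by omega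
        have hmlo : mid - lo ≤ n := by omega
        have hhm : hi - mid ≤ n := by omega
        rw [ih i lo mid hmlo hmid1 (by omega)]
        rw [ih _ mid hi hhm hmid2 hhb]
        rw [seg_split b lo mid hi hmid1 hmid2, pvG_append]
        have hdd : (a.drop i).drop (pvG (a.drop i) ((b.drop lo).take (mid - lo))).2
            = a.drop (i + (pvG (a.drop i) ((b.drop lo).take (mid - lo))).2) := by
          rw [List.drop_drop, Nat.add_comm]
        rw [hdd]
        simp [Nat.add_assoc]

-- ===== VERDICT (by name: the statement is the Claim_ definition above) =====
theorem filter_indices_spec : Claim_equal_filter_indices := by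
  intro a b _
  show filter_indices a b = filter_indices_alt a b
  have hA := loopA_eq_pvG a b (a.length + b.length) 0 0 [] (by omega)
  have hB := pvGo_eq_pvG a b b.length 0 0 b.length (by omega) (by omega) (by omega)
  simp only [List.drop_zero] at hA hB
  rw [filter_indices, filter_indices_alt, hA, hB]
  simp
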